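-- pv_equiv track=rewrite | github.com/Yencry/my-loon-adblock | extract_clash_rules.py | split_top_level_blocks
-- ===== SOURCE A (Python) =====
-- from typing import List, Optional, Tuple
--
-- def get_top_level_key_name(line: str) -> Optional[str]:
--     """Return the top-level key name if this line starts a top-level mapping key.
--
--     Very simple heuristic:
--     - no leading spaces
--     - not a comment
--     - contains ':'
--     - key part is non-empty
--     """
--
--     if not line.strip():
--         return None
--
--     if line.startswith(" ") or line.startswith("\t"):
--         return None
--
--     stripped = line.lstrip()
--     if stripped.startswith("#"):
--         return None
--
--     if ":" not in line:
--         return None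
--
--     key_part = line.split(":", 1)[0].strip()
--     if not key_part:
--         return None
--
--     return key_part
--
-- def split_top_level_blocks(lines: List[str]) -> List[Tuple[Optional[str], List[str]]]:
--     """Split file into (key, lines) blocks at top-level mapping keys.
--
--     key == None means "preamble" before the first top-level key.
--     """
--
--     blocks: List[Tuple[Optional[str], List[str]]] = []
--     current_key: Optional[str] = None
--     current_lines: List[str] = []
--
--     for line in lines:
--         key = get_top_level_key_name(line)
--         if key is not None:
--             # new block starts
--             if current_lines:
--                 blocks.append((current_key, current_lines))
--             current_key = key
--             current_lines = [line]
--         else: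
--             current_lines.append(line)
--
--     if current_lines:
--         blocks.append((current_key, current_lines))
--
--     return blocks
-- ===== SOURCE B (Python) =====
-- from typing import List, Optional, Tuple
--
-- def get_top_level_key_name(line: str) -> Optional[str]:
--     if not line.strip():
--         return None
--     if line.startswith(" ") or line.startswith("\t"):
--         return None
--     stripped = line.lstrip()
--     if stripped.startswith("#"):
--         return None
--     if ":" not in line:
--         return None
--     key_part = line.split(":", 1)[0].strip()
--     if not key_part:
--         return None
--     return key_part
--
-- def split_top_level_blocks(lines: List[str]) -> List[Tuple[Optional[str], List[str]]]:
--     def not_key(line):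
--         return get_top_level_key_name(line) is None
--     n = len(lines)
--     j = 0
--     while j < n and not_key(lines[j]):
--         j += 1
--     blocks = [] if j == 0 else [(None, lines[:j])]
--     while j < n:
--         k = j + 1
--         while k < n and not_key(lines[k]):
--             k += 1
--         blocks.append((get_top_level_key_name(lines[j]), lines[j:k]))
--         j = k
--     return blocks
-- ===== Notes on version B (the rewrite author's own statement) =====
-- stated objective: alternative
-- what changed: Replaces A's single accumulator fold (pending key + pending lines + flush-on-key) with a span-based decomposition: take the non-key preamble, then repeatedly emit a key line together with its following run of non-key lines.
import Mathlib
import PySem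

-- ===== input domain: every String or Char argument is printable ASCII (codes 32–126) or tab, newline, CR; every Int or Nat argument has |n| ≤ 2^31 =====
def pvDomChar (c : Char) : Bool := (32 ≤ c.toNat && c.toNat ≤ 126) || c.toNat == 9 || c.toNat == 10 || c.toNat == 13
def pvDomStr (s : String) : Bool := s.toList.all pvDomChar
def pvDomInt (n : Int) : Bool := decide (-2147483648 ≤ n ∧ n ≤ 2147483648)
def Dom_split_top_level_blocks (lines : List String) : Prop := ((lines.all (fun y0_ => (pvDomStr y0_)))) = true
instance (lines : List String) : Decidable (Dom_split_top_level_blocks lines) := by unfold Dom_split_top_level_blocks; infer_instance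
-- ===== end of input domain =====

-- B replaces A's one-pass accumulator fold by a span-based decomposition (preamble = takeWhile of
-- non-key lines, then each block = a key line plus the following non-key lines); objective: alternative.

-- ===== PORT A =====
-- shared helper: get_top_level_key_name (used verbatim by both Pythons)
def get_top_level_key_name (line : String) : Option String :=
  if PySem.Str.strip line = "" then none
  else if PySem.Str.startswith line " " || PySem.Str.startswith line "\t" then none
  else
    let stripped := PySem.Str.lstrip line
    if PySem.Str.startswith stripped "#" then none
    else if !(PySem.Str.isIn ":" line) then none
    else
      -- line.split(":", 1)[0]  (":" ≠ "" so splitMax? is some; split is never empty)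
      let key_part := PySem.Str.strip (((PySem.Str.splitMax? line ":" 1).getD []).headD "")
      if key_part = "" then none else some key_part

def stepA (st : List (Option String × List String) × Option String × List String)
    (line : String) : List (Option String × List String) × Option String × List String :=
  match get_top_level_key_name line with
  | some k => ((if st.2.2 = [] then st.1 else st.1 ++ [(st.2.1, st.2.2)]), some k, [line])
  | none => (st.1, st.2.1, st.2.2 ++ [line])

def finishA (st : List (Option String × List String) × Option String × List String) :
    List (Option String × List String) :=
  if st.2.2 = [] then st.1 else st.1 ++ [(st.2.1, st.2.2)]

def split_top_level_blocks (lines : List String) : List (Option String × List String) :=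
  finishA (lines.foldl stepA ([], none, []))

-- ===== PORT B =====
def noKey (line : String) : Bool := (get_top_level_key_name line).isNone

-- inner while-loop pair of Source B: first line is a key line, grab it plus following non-key lines
def splitBlocksRec (ls : List String) : List (Option String × List String) :=
  match ls with
  | [] => []
  | l :: rest =>
    (get_top_level_key_name l, l :: rest.takeWhile noKey) :: splitBlocksRec (rest.dropWhile noKey)
termination_by ls.length
decreasing_by
  simpa using Nat.lt_succ_of_le (List.length_dropWhile_le _ _)

def split_top_level_blocks_alt (lines : List String) : List (Option String × List String) :=
  let pre := lines.takeWhile noKey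
  (if pre = [] then [] else [(none, pre)]) ++ splitBlocksRec (lines.dropWhile noKey)

-- ===== PRECONDITION & SPEC =====
def Spec_split_top_level_blocks (lines : List String) (out : List (Option String × List String)) : Prop := out = split_top_level_blocks_alt lines
instance (lines : List String) (out : List (Option String × List String)) : Decidable (Spec_split_top_level_blocks lines out) := by unfold Spec_split_top_level_blocks; infer_instance

-- ===== CLAIM (what is proved, stated in full; the proofs are below) =====
def Claim_equal_split_top_level_blocks : Prop := ∀ (lines : List String), Dom_split_top_level_blocks lines → Spec_split_top_level_blocks lines (split_top_level_blocks lines)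

-- ===== LEMMAS AND PROOFS =====

-- already-accumulated blocks are a passive prefix of A's fold
theorem finishA_foldl_prefix (ls : List String)
    (blocks : List (Option String × List String)) (ck : Option String) (cl : List String) :
    finishA (ls.foldl stepA (blocks, ck, cl)) = blocks ++ finishA (ls.foldl stepA ([], ck, cl)) := by
  induction ls generalizing blocks ck cl with
  | nil =>
    simp only [List.foldl_nil, finishA]
    split <;> simp
  | cons l ls ih =>
    simp only [List.foldl_cons, stepA]
    cases h : get_top_level_key_name l with
    | none => exact ih blocks ck (cl ++ [l])
    | some k =>
      simp only
      by_cases hcl : cl = []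
      · simp only [if_pos hcl]
        exact ih blocks (some k) [l]
      · simp only [if_neg hcl]
        rw [ih (blocks ++ [(ck, cl)]), ih ([] ++ [(ck, cl)])]
        simp

-- A's fold from state (ck, cl) produces the pending block extended by the next span, then B's tail
theorem finishA_foldl_eq (ls : List String) (ck : Option String) (cl : List String) :
    finishA (ls.foldl stepA ([], ck, cl)) =
      (if cl ++ ls.takeWhile noKey = [] then [] else [(ck, cl ++ ls.takeWhile noKey)])
        ++ splitBlocksRec (ls.dropWhile noKey) := by
  induction ls generalizing ck cl with
  | nil => simp [finishA, splitBlocksRec]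
  | cons l ls ih =>
    simp only [List.foldl_cons, stepA]
    cases h : get_top_level_key_name l with
    | none =>
      have hp : noKey l = true := by simp [noKey, h]
      simp only [List.takeWhile_cons, List.dropWhile_cons, hp, if_true]
      rw [ih ck (cl ++ [l])]
      simp
    | some k =>
      have hp : noKey l = false := by simp [noKey, h]
      simp only [List.takeWhile_cons, List.dropWhile_cons, hp]
      rw [finishA_foldl_prefix, ih (some k) [l]]
      simp [splitBlocksRec, h]

-- ===== VERDICT (by name: the statement is the Claim_ definition above) =====
theorem split_top_level_blocks_spec : Claim_equal_split_top_level_blocks := by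
  intro lines _
  unfold Spec_split_top_level_blocks split_top_level_blocks split_top_level_blocks_alt
  rw [finishA_foldl_eq]
  simp
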